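-- pv_equiv track=rewrite | github.com/FruVirus/coding_practice | src/leet/graph/parallel_courses.py | sol_dfs
-- ===== SOURCE A (Python) =====
-- def sol_dfs(n, relations):
--     graph, done = {i: [] for i in range(1, n + 1)}, {}
--     for u, v in relations:
--         graph[u].append(v)
--
--     def is_dag(u):
--         if u in done:
--             return done[u]
--         done[u] = False
--         if not all(is_dag(v) for v in graph[u]):
--             return False
--         done[u] = True
--         return True
--
--     if not all(is_dag(u) for u in graph):
--         return -1
--     done = {}
--
--     def backtrack(u):
--         if u in done:
--             return done[u]
--         max_courses = 1
--         for v in graph[u]: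
--             num_courses = backtrack(v)
--             max_courses = max(max_courses, num_courses + 1)
--         done[u] = max_courses
--         return max_courses
--
--     return max(backtrack(u) for u in graph)
-- ===== SOURCE B (Python) =====
-- def sol_dfs(n, relations):
--     # Iterative value iteration (Bellman-Ford style) instead of recursive DFS:
--     # dist[u] after k rounds = length of the longest chain from u using at most k edges.
--     # An acyclic graph reaches a fixpoint within min(n, len(relations) + 1) rounds
--     # (a chain repeats no edge); a graph with a cycle never stabilizes, so -1.
--     succ = [[] for _ in range(n + 1)]
--     for u, v in relations:
--         succ[u].append(v)
--     dist = [1] * (n + 1)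
--     for _ in range(min(n, len(relations) + 1)):
--         new = [1 + max((dist[v] for v in succ[u]), default=0) for u in range(n + 1)]
--         if new == dist:
--             return max(dist[1:])
--         dist = new
--     return -1
-- ===== Notes on version B (the rewrite author's own statement) =====
-- stated objective: alternative
-- what changed: Replaced the two recursive memoized DFS passes (cycle check, then longest-chain backtracking) by a single iterative Bellman-Ford-style value iteration: dist starts at 1 for every node and is relaxed for at most min(n, len(relations)+1) rounds; reaching a fixpoint yields max(dist[1:]), and failure to stabilize within those rounds means a cycle, so -1.
import Mathlib
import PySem

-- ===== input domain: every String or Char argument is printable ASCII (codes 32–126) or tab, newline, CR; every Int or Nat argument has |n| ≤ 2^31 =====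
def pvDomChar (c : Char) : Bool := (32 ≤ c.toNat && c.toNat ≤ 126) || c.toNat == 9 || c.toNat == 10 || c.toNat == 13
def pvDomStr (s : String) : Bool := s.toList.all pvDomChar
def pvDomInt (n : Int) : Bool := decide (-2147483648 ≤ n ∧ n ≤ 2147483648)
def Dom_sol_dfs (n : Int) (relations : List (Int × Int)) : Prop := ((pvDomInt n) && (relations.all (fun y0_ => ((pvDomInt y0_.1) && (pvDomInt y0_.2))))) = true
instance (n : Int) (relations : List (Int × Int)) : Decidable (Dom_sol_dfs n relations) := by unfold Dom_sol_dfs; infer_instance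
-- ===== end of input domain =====

-- B changes the algorithm: A's two recursive memoized DFS passes become one iterative
-- Bellman-Ford-style value iteration to a fixpoint (no recursion); same results on Pre_.

-- ===== PORT A =====
-- dict {i: [] for i in range(1, n+1)} with graph[u].append(v): adjacency realised as an
-- array indexed by node (keys are exactly 0 < u <= n under Pre_; index 0 stays empty)
def pvGraphA (n : Int) (relations : List (Int × Int)) : Array (Array Int) :=
  relations.foldl (fun g p => g.modify p.1.toNat (fun a => a.push p.2))
    (Array.replicate (n+1).toNat #[])

-- the memo dict `done` realised as an array over the same keys: done.get(u) / done[u] = x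
def pvDGet {α : Type} (d : Array (Option α)) (u : Int) : Option α := d.getD u.toNat none
def pvDSet {α : Type} (d : Array (Option α)) (u : Int) (x : α) : Array (Option α) :=
  d.setIfInBounds u.toNat (some x)

-- is_dag(u) with its memo threaded explicitly; fuel only makes the Python recursion
-- structural (with the fuel used below it is proved never to run out on Pre_)
mutual
def pvIsDagA (g : Array (Array Int)) : Nat → Int → Array (Option Bool) → Bool × Array (Option Bool)
  | 0, _, done => (false, done)
  | fuel+1, u, done =>
    match pvDGet done u with
    | some b => (b, done)                                  -- if u in done: return done[u]
    | none =>
      -- done[u] = False; if not all(is_dag(v) for v in graph[u]): return False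
      let r := pvIsDagAAll g fuel (g.getD u.toNat #[]).toList (pvDSet done u false)
      if r.1 then (true, pvDSet r.2 u true) else (false, r.2)
  termination_by f _ _ => (f, 0)
-- all(is_dag(v) for v in vs), short-circuiting, threading the memo
def pvIsDagAAll (g : Array (Array Int)) : Nat → List Int → Array (Option Bool) → Bool × Array (Option Bool)
  | _, [], done => (true, done)
  | fuel, v :: vs, done =>
    let r := pvIsDagA g fuel v done
    if r.1 then pvIsDagAAll g fuel vs r.2 else (false, r.2)
  termination_by f vs _ => (f, vs.length + 1)
end

-- backtrack(u) with its memo threaded; fuel as above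
mutual
def pvBtA (g : Array (Array Int)) : Nat → Int → Array (Option Int) → Int × Array (Option Int)
  | 0, _, done => (0, done)
  | fuel+1, u, done =>
    match pvDGet done u with
    | some m => (m, done)                                  -- if u in done: return done[u]
    | none =>
      let r := pvBtAFor g fuel (g.getD u.toNat #[]).toList 1 done
      (r.1, pvDSet r.2 u r.1)                              -- done[u] = max_courses
  termination_by f _ _ => (f, 0)
def pvBtAFor (g : Array (Array Int)) : Nat → List Int → Int → Array (Option Int) → Int × Array (Option Int)
  | _, [], acc, done => (acc, done)
  | fuel, v :: vs, acc, done =>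
    let r := pvBtA g fuel v done
    pvBtAFor g fuel vs (max acc (r.1 + 1)) r.2             -- max_courses = max(max_courses, backtrack(v) + 1)
  termination_by f vs _ _ => (f, vs.length + 1)
end

-- max(backtrack(u) for u in graph) (acc none = empty generator: Python raises ValueError, outside Pre_)
def pvMaxBtA (g : Array (Array Int)) (fuel : Nat) : List Int → Option Int → Array (Option Int) → Int
  | [], acc, _ => acc.getD 0
  | u :: us, acc, done =>
    let r := pvBtA g fuel u done
    pvMaxBtA g fuel us (some (match acc with | none => r.1 | some m => max m r.1)) r.2

def sol_dfs (n : Int) (relations : List (Int × Int)) : Int :=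
  let g := pvGraphA n relations
  let fuel := n.toNat + 1
  -- `for u in graph` iterates the dict's keys, which are exactly range(1, n+1)
  let chk := pvIsDagAAll g fuel (PySem.List.pyRange 1 (n+1)) (Array.replicate (n+1).toNat none)
  if chk.1 then pvMaxBtA g fuel (PySem.List.pyRange 1 (n+1)) none (Array.replicate (n+1).toNat none)
  else -1

-- ===== PORT B =====
-- succ = [[] for _ in range(n + 1)]; succ[u].append(v)  (index u in range under Pre_)
def pvSuccB (n : Int) (relations : List (Int × Int)) : Array (Array Int) :=
  relations.foldl (fun s p => s.modify p.1.toNat (fun a => a.push p.2))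
    (Array.replicate (n+1).toNat #[])

-- new = [1 + max((dist[v] for v in succ[u]), default=0) for u in range(n + 1)]
-- (indices u, v are in 0..n under Pre_, so plain array reads are exact)
def pvStepB (n : Int) (succ : Array (Array Int)) (dist : Array Int) : Array Int :=
  ((PySem.List.pyRange 0 (n+1)).map (fun u =>
    1 + PySem.List.maxD ((succ.getD u.toNat #[]).toList.map (fun v => dist.getD v.toNat 0))
      (fun x => x) 0)).toArray

-- the `for _ in range(min(n, len(relations)+1))` loop;
-- Python's max(dist[1:]) raises on n < 1, outside Pre_ (getD 0 junk)
def pvRoundsB (n : Int) (succ : Array (Array Int)) : Nat → Array Int → Int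
  | 0, _ => -1
  | k+1, dist =>
    let new := pvStepB n succ dist
    if new = dist then
      (PySem.List.max? (PySem.List.slice dist.toList (some 1) none) (fun x => x)).getD 0
    else pvRoundsB n succ k new

def sol_dfs_alt (n : Int) (relations : List (Int × Int)) : Int :=
  pvRoundsB n (pvSuccB n relations) (min n ((relations.length : Int) + 1)).toNat
    (Array.replicate (n+1).toNat 1)

-- ===== PRECONDITION & SPEC =====
-- Pre_ excludes exactly the inputs on which Python A raises: n < 1 (ValueError: max of an
-- empty generator) and relations mentioning a node outside 1..n (KeyError on graph[u]).
def Pre_sol_dfs (n : Int) (relations : List (Int × Int)) : Prop :=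
  1 ≤ n ∧ ∀ p ∈ relations, 1 ≤ p.1 ∧ p.1 ≤ n ∧ 1 ≤ p.2 ∧ p.2 ≤ n
instance (n : Int) (relations : List (Int × Int)) : Decidable (Pre_sol_dfs n relations) := by
  unfold Pre_sol_dfs; infer_instance

def pvWitness_sol_dfs : Int × (List (Int × Int)) := (3, [(1, 2), (2, 3)])

def Spec_sol_dfs (n : Int) (relations : List (Int × Int)) (out : Int) : Prop := out = sol_dfs_alt n relations
instance (n : Int) (relations : List (Int × Int)) (out : Int) : Decidable (Spec_sol_dfs n relations out) := by
  unfold Spec_sol_dfs; infer_instance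

-- ===== CLAIM (what is proved, stated in full; the proofs are below) =====
def Claim_equal_sol_dfs : Prop := ∀ (n : Int) (relations : List (Int × Int)), Dom_sol_dfs n relations → Pre_sol_dfs n relations → Spec_sol_dfs n relations (sol_dfs n relations)

-- ===== LEMMAS AND PROOFS =====

-- ---- proof-side definitions ----
def succL (rel : List (Int × Int)) (u : Int) : List Int :=
  (rel.filter (fun p => p.1 == u)).map (fun p => p.2)
def SafeR (rel : List (Int × Int)) (u : Int) : Prop := Acc (fun v u => (u, v) ∈ rel) u
def LPv (rel : List (Int × Int)) : Nat → Int → Int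
  | 0, _ => 1
  | k+1, u => 1 + PySem.List.maxD ((succL rel u).map (LPv rel k)) (fun x => x) 0
inductive ReachR (rel : List (Int × Int)) : Int → Int → Prop
  | refl (a : Int) : ReachR rel a a
  | tail {a b c : Int} : ReachR rel a b → (b, c) ∈ rel → ReachR rel a c
def ReachP (rel : List (Int × Int)) (a c : Int) : Prop := ∃ b, (a, b) ∈ rel ∧ ReachR rel b c
lemma maxD_le {xs : List Int} {c d : Int} (hd : d ≤ c) (h : ∀ x ∈ xs, x ≤ c) :
    PySem.List.maxD xs (fun x => x) d ≤ c := by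
  unfold PySem.List.maxD
  cases hm : PySem.List.max? xs (fun x => x) with
  | none => simpa using hd
  | some m => simpa using h m (PySem.List.max?_mem hm)
lemma le_maxD_of_mem {xs : List Int} {x : Int} (hx : x ∈ xs) (d : Int) :
    x ≤ PySem.List.maxD xs (fun x => x) d := by
  unfold PySem.List.maxD
  cases hm : PySem.List.max? xs (fun x => x) with
  | none => exact absurd ((PySem.List.max?_eq_none_iff xs _).mp hm ▸ hx) (List.not_mem_nil)
  | some m => simpa using PySem.List.max?_isMax hm x hx
lemma maxD_mem_cons {xs : List Int} (d : Int) :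
    PySem.List.maxD xs (fun x => x) d ∈ d :: xs := by
  unfold PySem.List.maxD
  cases hm : PySem.List.max? xs (fun x => x) with
  | none => simp
  | some m => simpa using Or.inr (PySem.List.max?_mem hm)
lemma mem_succL {rel : List (Int × Int)} {u v : Int} : v ∈ succL rel u ↔ (u, v) ∈ rel := by
  constructor
  · rintro hv
    simp only [succL, List.mem_map, List.mem_filter, beq_iff_eq] at hv
    obtain ⟨p, ⟨hp, h1⟩, h2⟩ := hv
    have : p = (u, v) := by cases p; simp_all
    exact this ▸ hp
  · intro h
    simp only [succL, List.mem_map, List.mem_filter, beq_iff_eq]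
    exact ⟨(u, v), ⟨h, rfl⟩, rfl⟩
lemma LPv_pos (rel : List (Int × Int)) : ∀ k u, 1 ≤ LPv rel k u := by
  intro k
  induction k with
  | zero => intro u; simp [LPv]
  | succ k ih =>
    intro u
    have h0 : (0:Int) ≤ PySem.List.maxD ((succL rel u).map (LPv rel k)) (fun x => x) 0 := by
      rcases List.mem_cons.mp (maxD_mem_cons (xs := (succL rel u).map (LPv rel k)) 0) with h | h
      · omega
      · obtain ⟨v, _, hv⟩ := List.mem_map.mp h
        have := ih v; omega
    simp only [LPv]; omega
lemma LPv_le (rel : List (Int × Int)) : ∀ k u, LPv rel k u ≤ (k : Int) + 1 := by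
  intro k
  induction k with
  | zero => intro u; simp [LPv]
  | succ k ih =>
    intro u
    have : PySem.List.maxD ((succL rel u).map (LPv rel k)) (fun x => x) 0 ≤ (k : Int) + 1 := by
      apply maxD_le (by positivity)
      intro x hx
      obtain ⟨v, _, hv⟩ := List.mem_map.mp hx
      exact hv ▸ ih v
    simp only [LPv]; push_cast; omega
lemma LPv_mono (rel : List (Int × Int)) : ∀ k u, LPv rel k u ≤ LPv rel (k+1) u := by
  intro k
  induction k with
  | zero =>
    intro u
    have := LPv_pos rel 1 u
    simpa [LPv] using this
  | succ k ih =>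
    intro u
    have hle : PySem.List.maxD ((succL rel u).map (LPv rel k)) (fun x => x) 0
        ≤ PySem.List.maxD ((succL rel u).map (LPv rel (k+1))) (fun x => x) 0 := by
      apply maxD_le
      · rcases List.mem_cons.mp (maxD_mem_cons (xs := (succL rel u).map (LPv rel (k+1))) 0) with h | h
        · omega
        · obtain ⟨v, _, hv⟩ := List.mem_map.mp h
          have := LPv_pos rel (k+1) v; omega
      · intro x hx
        obtain ⟨v, hvmem, hv⟩ := List.mem_map.mp hx
        calc x = LPv rel k v := hv.symm
        _ ≤ LPv rel (k+1) v := ih v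
        _ ≤ _ := le_maxD_of_mem (List.mem_map_of_mem hvmem) 0
    show LPv rel (k+1+1) u ≥ _
    simp only [LPv] at *
    omega
lemma cyclic_succ {rel : List (Int × Int)} {u : Int} (h : ¬ SafeR rel u) :
    ∃ v, (u, v) ∈ rel ∧ ¬ SafeR rel v := by
  by_contra hc
  push_neg at hc
  exact h (Acc.intro u (fun v hv => hc v hv))
lemma LPv_cyclic {rel : List (Int × Int)} {u : Int} :
    ∀ k, ¬ SafeR rel u → LPv rel k u = (k : Int) + 1 := by
  intro k
  induction k generalizing u with
  | zero => intro _; simp [LPv]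
  | succ k ih =>
    intro h
    obtain ⟨v, hv, hvun⟩ := cyclic_succ h
    have h1 : LPv rel k v = (k : Int) + 1 := ih hvun
    have h2 : (k : Int) + 1 ≤ PySem.List.maxD ((succL rel u).map (LPv rel k)) (fun x => x) 0 :=
      h1 ▸ le_maxD_of_mem (List.mem_map_of_mem (mem_succL.mpr hv)) 0
    have h3 : PySem.List.maxD ((succL rel u).map (LPv rel k)) (fun x => x) 0 ≤ (k : Int) + 1 := by
      apply maxD_le (by positivity)
      intro x hx
      obtain ⟨w, _, hw⟩ := List.mem_map.mp hx
      exact hw ▸ LPv_le rel k w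
    simp only [LPv]; push_cast; omega
lemma LPv_succ (rel : List (Int × Int)) (k : Nat) (u : Int) :
    LPv rel (k+1) u = 1 + PySem.List.maxD ((succL rel u).map (LPv rel k)) (fun x => x) 0 := rfl
lemma LPv_jump (rel : List (Int × Int)) :
    ∀ k u, LPv rel (k+1) u ≠ LPv rel k u → LPv rel k u = (k : Int) + 1 := by
  intro k
  induction k with
  | zero => intro u _; simp [LPv]
  | succ k ih =>
    intro u hne
    have hex : ∃ v ∈ succL rel u, LPv rel (k+1) v ≠ LPv rel k v := by
      by_contra hc
      push_neg at hc
      have hmap : (succL rel u).map (LPv rel (k+1)) = (succL rel u).map (LPv rel k) :=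
        List.map_congr_left hc
      refine hne ?_
      calc LPv rel (k+1+1) u
          = 1 + PySem.List.maxD ((succL rel u).map (LPv rel (k+1))) (fun x => x) 0 :=
            LPv_succ rel (k+1) u
        _ = 1 + PySem.List.maxD ((succL rel u).map (LPv rel k)) (fun x => x) 0 := by rw [hmap]
        _ = LPv rel (k+1) u := (LPv_succ rel k u).symm
    obtain ⟨v, hvmem, hvne⟩ := hex
    have h1 : LPv rel k v = (k : Int) + 1 := ih v hvne
    have h3 : (k : Int) + 1 ≤ PySem.List.maxD ((succL rel u).map (LPv rel k)) (fun x => x) 0 :=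
      h1 ▸ le_maxD_of_mem (List.mem_map_of_mem hvmem) 0
    have h4 : PySem.List.maxD ((succL rel u).map (LPv rel k)) (fun x => x) 0 ≤ (k : Int) + 1 := by
      apply maxD_le (by positivity)
      intro x hx
      obtain ⟨w, _, hw⟩ := List.mem_map.mp hx
      have := LPv_le rel k w
      omega
    rw [LPv_succ rel k u]
    push_cast
    omega
lemma reach_head {rel : List (Int × Int)} {u v w : Int} (e : (u, v) ∈ rel)
    (h : ReachR rel v w) : ReachR rel u w := by
  induction h with
  | refl => exact ReachR.tail (ReachR.refl u) e
  | tail _ e' ih => exact ReachR.tail ih e'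
lemma reach_split {rel : List (Int × Int)} {a c : Int} (h : ReachR rel a c) :
    a = c ∨ ∃ b, (a, b) ∈ rel ∧ ReachR rel b c := by
  induction h with
  | refl => exact Or.inl rfl
  | @tail y z _ e ih =>
    rcases ih with rfl | ⟨b, hb, hr⟩
    · exact Or.inr ⟨z, e, ReachR.refl z⟩
    · exact Or.inr ⟨b, hb, ReachR.tail hr e⟩
lemma cyc_not_safe {rel : List (Int × Int)} {u : Int} (h : ReachP rel u u) : ¬ SafeR rel u := by
  intro hs
  unfold SafeR at hs
  induction hs with
  | intro u hacc ih =>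
    obtain ⟨v, he, hr⟩ := h
    rcases reach_split hr with rfl | ⟨w, hw, hrw⟩
    · exact ih v he ⟨v, he, ReachR.refl v⟩
    · exact ih v he ⟨w, hw, ReachR.tail hrw he⟩
noncomputable def reachF (n : Int) (rel : List (Int × Int)) (u : Int) : Finset Int :=
  @Finset.filter _ (fun w => ReachR rel u w) (Classical.decPred _) (Finset.Icc 1 n)
lemma mem_reachF {n : Int} {rel : List (Int × Int)} {u w : Int} :
    w ∈ reachF n rel u ↔ (1 ≤ w ∧ w ≤ n) ∧ ReachR rel u w := by
  simp [reachF, Finset.mem_filter, Finset.mem_Icc, and_comm]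
lemma self_mem_reachF {n : Int} {rel : List (Int × Int)} {u : Int}
    (h1 : 1 ≤ u) (h2 : u ≤ n) : u ∈ reachF n rel u :=
  mem_reachF.mpr ⟨⟨h1, h2⟩, ReachR.refl u⟩
lemma reachF_card_le {n : Int} {rel : List (Int × Int)} {u : Int} :
    (reachF n rel u).card ≤ n.toNat := by
  classical
  calc (reachF n rel u).card ≤ (Finset.Icc (1:Int) n).card := Finset.card_filter_le _ _
    _ = (n + 1 - 1).toNat := Int.card_Icc 1 n
    _ = n.toNat := by omega
lemma reachF_succ_subset {n : Int} {rel : List (Int × Int)} {u v : Int}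
    (hs : SafeR rel u) (he : (u, v) ∈ rel) :
    reachF n rel v ⊆ (reachF n rel u).erase u := by
  intro w hw
  obtain ⟨hicc, hr⟩ := mem_reachF.mp hw
  refine Finset.mem_erase.mpr ⟨?_, mem_reachF.mpr ⟨hicc, reach_head he hr⟩⟩
  rintro rfl
  exact cyc_not_safe ⟨v, he, hr⟩ hs
lemma lp_le_reach_card (n : Int) {rel : List (Int × Int)}
    (hrel : ∀ p ∈ rel, 1 ≤ p.1 ∧ p.1 ≤ n ∧ 1 ≤ p.2 ∧ p.2 ≤ n) :
    ∀ (k : Nat) (u : Int), SafeR rel u → 1 ≤ u → u ≤ n →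
      LPv rel k u ≤ ((reachF n rel u).card : Int) := by
  intro k
  induction k with
  | zero =>
    intro u _ h1 h2
    have : u ∈ reachF n rel u := self_mem_reachF h1 h2
    have hpos : 0 < (reachF n rel u).card := Finset.card_pos.mpr ⟨u, this⟩
    simp only [LPv]
    omega
  | succ k ih =>
    intro u hs h1 h2
    have humem : u ∈ reachF n rel u := self_mem_reachF h1 h2
    have hpos : 0 < (reachF n rel u).card := Finset.card_pos.mpr ⟨u, humem⟩
    have hbound : PySem.List.maxD ((succL rel u).map (LPv rel k)) (fun x => x) 0
        ≤ ((reachF n rel u).card : Int) - 1 := by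
      apply maxD_le (by omega)
      intro x hx
      obtain ⟨v, hvmem, hv⟩ := List.mem_map.mp hx
      have he : (u, v) ∈ rel := mem_succL.mp hvmem
      have hsv : SafeR rel v := Acc.inv hs he
      have hv1 : 1 ≤ v ∧ v ≤ n := by have := hrel _ he; exact ⟨this.2.2.1, this.2.2.2⟩
      have hle : LPv rel k v ≤ ((reachF n rel v).card : Int) := ih v hsv hv1.1 hv1.2
      have hsub : (reachF n rel v).card ≤ ((reachF n rel u).erase u).card :=
        Finset.card_le_card (reachF_succ_subset hs he)
      have herase : ((reachF n rel u).erase u).card = (reachF n rel u).card - 1 :=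
        Finset.card_erase_of_mem humem
      rw [herase] at hsub
      have : ((reachF n rel v).card : Int) ≤ ((reachF n rel u).card : Int) - 1 := by
        omega
      omega
    rw [LPv_succ]
    omega
lemma safe_bound (n : Int) {rel : List (Int × Int)}
    (hrel : ∀ p ∈ rel, 1 ≤ p.1 ∧ p.1 ≤ n ∧ 1 ≤ p.2 ∧ p.2 ≤ n) (hn : 1 ≤ n) :
    ∀ u, SafeR rel u → 1 ≤ u → u ≤ n → ∀ k, LPv rel k u ≤ n := by
  intro u hs h1 h2 k
  have h := lp_le_reach_card n hrel k u hs h1 h2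
  have h2' : (reachF n rel u).card ≤ n.toNat := reachF_card_le
  omega
-- edges reachable from u, as a Finset of distinct pairs (proof-side only)
noncomputable def edgeRF (rel : List (Int × Int)) (u : Int) : Finset (Int × Int) :=
  @Finset.filter _ (fun p => ReachR rel u p.1) (Classical.decPred _) rel.toFinset

lemma mem_edgeRF {rel : List (Int × Int)} {u : Int} {p : Int × Int} :
    p ∈ edgeRF rel u ↔ p ∈ rel ∧ ReachR rel u p.1 := by
  simp [edgeRF, Finset.mem_filter, List.mem_toFinset]

lemma edgeRF_card_le (rel : List (Int × Int)) (u : Int) :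
    (edgeRF rel u).card ≤ rel.length := by
  classical
  calc (edgeRF rel u).card ≤ rel.toFinset.card := Finset.card_filter_le _ _
    _ ≤ rel.length := rel.toFinset_card_le

lemma edgeRF_succ_subset {rel : List (Int × Int)} {u v : Int}
    (hs : SafeR rel u) (he : (u, v) ∈ rel) :
    edgeRF rel v ⊆ (edgeRF rel u).erase (u, v) := by
  intro p hp
  obtain ⟨hpm, hr⟩ := mem_edgeRF.mp hp
  refine Finset.mem_erase.mpr ⟨?_, mem_edgeRF.mpr ⟨hpm, reach_head he hr⟩⟩
  rintro rfl
  exact cyc_not_safe ⟨v, he, hr⟩ hs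

lemma lp_le_edge_card (rel : List (Int × Int)) :
    ∀ (k : Nat) (u : Int), SafeR rel u → LPv rel k u ≤ 1 + ((edgeRF rel u).card : Int) := by
  intro k
  induction k with
  | zero =>
    intro u _
    have : (0:Int) ≤ ((edgeRF rel u).card : Int) := by positivity
    simp only [LPv]
    omega
  | succ k ih =>
    intro u hs
    have hbound : PySem.List.maxD ((succL rel u).map (LPv rel k)) (fun x => x) 0
        ≤ ((edgeRF rel u).card : Int) := by
      apply maxD_le (by positivity)
      intro x hx
      obtain ⟨v, hvmem, hveq⟩ := List.mem_map.mp hx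
      have he : (u, v) ∈ rel := mem_succL.mp hvmem
      have hsv : SafeR rel v := Acc.inv hs he
      have hle := ih v hsv
      have hmemu : (u, v) ∈ edgeRF rel u := mem_edgeRF.mpr ⟨he, ReachR.refl u⟩
      have hsub : (edgeRF rel v).card ≤ ((edgeRF rel u).erase (u, v)).card :=
        Finset.card_le_card (edgeRF_succ_subset hs he)
      have herase : ((edgeRF rel u).erase (u, v)).card = (edgeRF rel u).card - 1 :=
        Finset.card_erase_of_mem hmemu
      have hpos : 0 < (edgeRF rel u).card := Finset.card_pos.mpr ⟨(u, v), hmemu⟩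
      omega
    rw [LPv_succ]
    omega

lemma safe_bound_edges (rel : List (Int × Int)) :
    ∀ u, SafeR rel u → ∀ k, LPv rel k u ≤ (rel.length : Int) + 1 := by
  intro u hs k
  have h1 := lp_le_edge_card rel k u hs
  have h2 := edgeRF_card_le rel u
  omega
lemma LPv_node_zero (n : Int) {rel : List (Int × Int)}
    (hrel : ∀ p ∈ rel, 1 ≤ p.1 ∧ p.1 ≤ n ∧ 1 ≤ p.2 ∧ p.2 ≤ n) :
    ∀ k : Nat, LPv rel k 0 = 1 := by
  intro k
  cases k with
  | zero => rfl
  | succ k =>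
    have hempty : succL rel 0 = [] := by
      rw [succL, List.filter_eq_nil_iff.mpr, List.map_nil]
      intro p hp
      have := hrel p hp
      simp
      omega
    rw [LPv_succ, hempty]
    rfl

-- once every node of 1..n is safe, LPv has stabilized after min(n, #edges + 1) - 1 rounds
lemma LPv_stab (n : Int) {rel : List (Int × Int)}
    (hrel : ∀ p ∈ rel, 1 ≤ p.1 ∧ p.1 ≤ n ∧ 1 ≤ p.2 ∧ p.2 ≤ n) (hn : 1 ≤ n)
    (hsafe : ∀ u, 1 ≤ u → u ≤ n → SafeR rel u) :
    ∀ (k : Nat), (min n ((rel.length : Int) + 1)).toNat ≤ k + 1 →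
      ∀ u, 0 ≤ u → u ≤ n → LPv rel (k+1) u = LPv rel k u := by
  intro k hk u hu0 hun
  by_cases hu1 : 1 ≤ u
  · by_contra hne
    have hjump := LPv_jump rel k u hne
    have hmono := LPv_mono rel k u
    have hbd := safe_bound n hrel hn u (hsafe u hu1 hun) hu1 hun (k+1)
    have hbd2 := safe_bound_edges rel u (hsafe u hu1 hun) (k+1)
    omega
  · have h0 : u = 0 := by omega
    rw [h0, LPv_node_zero n hrel, LPv_node_zero n hrel]
-- ---- adjacency-array bridging (shared build shape of both ports) ----
lemma adjFold_get (l : List (Int × Int)) :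
    ∀ (s : Array (Array Int)), (∀ p ∈ l, 1 ≤ p.1 ∧ p.1.toNat < s.size) →
      ∀ (j : Nat), j < s.size →
      ((l.foldl (fun g p => g.modify p.1.toNat (fun a => a.push p.2)) s).getD j #[]).toList
        = (s.getD j #[]).toList ++ (l.filter (fun p => p.1 == (j : Int))).map (fun p => p.2) := by
  induction l with
  | nil => intro s _ j hj; simp
  | cons p l ih =>
    intro s hpre j hj
    have hp := hpre p List.mem_cons_self
    rw [List.foldl_cons]
    rw [ih _ (fun q hq => ⟨(hpre q (List.mem_cons_of_mem _ hq)).1,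
        by rw [Array.size_modify]; exact (hpre q (List.mem_cons_of_mem _ hq)).2⟩)
      j (by rw [Array.size_modify]; exact hj)]
    have hsj : s[j]? = some s[j] := Array.getElem?_eq_getElem hj
    have hgetj : (s.modify p.1.toNat (fun a => a.push p.2)).getD j #[]
        = if p.1.toNat = j then s[j].push p.2 else s[j] := by
      rw [Array.getD_eq_getD_getElem?, Array.getElem?_modify, hsj]
      split <;> rfl
    have hsval : s.getD j #[] = s[j] := by
      rw [Array.getD_eq_getD_getElem?, hsj]; rfl
    by_cases hpj : p.1.toNat = j
    · have hpj' : (p.1 == (j : Int)) = true := by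
        simp only [beq_iff_eq]; omega
      rw [List.filter_cons, if_pos hpj', List.map_cons, hgetj, if_pos hpj, hsval,
        Array.toList_push, List.append_assoc]
      rfl
    · have hpj' : ¬ ((p.1 == (j : Int)) = true) := by
        simp only [beq_iff_eq]; omega
      rw [List.filter_cons, if_neg hpj', hgetj, if_neg hpj, hsval]

lemma adjA_get (n : Int) (rel : List (Int × Int))
    (hrel : ∀ p ∈ rel, 1 ≤ p.1 ∧ p.1 ≤ n ∧ 1 ≤ p.2 ∧ p.2 ≤ n) :
    ∀ u : Int, 0 ≤ u → u ≤ n →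
      ((pvGraphA n rel).getD u.toNat #[]).toList = succL rel u := by
  intro u h0 hun
  unfold pvGraphA
  rw [adjFold_get rel _
    (fun p hp => ⟨(hrel p hp).1, by have := hrel p hp; rw [Array.size_replicate]; omega⟩)
    u.toNat (by rw [Array.size_replicate]; omega)]
  have hbase : (Array.replicate (n+1).toNat (#[] : Array Int)).getD u.toNat #[] = #[] := by
    rw [Array.getD_eq_getD_getElem?, Array.getElem?_replicate]
    split <;> rfl
  rw [hbase, show ((u.toNat : Nat) : Int) = u by omega]
  rfl

lemma adjB_get (n : Int) (rel : List (Int × Int))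
    (hrel : ∀ p ∈ rel, 1 ≤ p.1 ∧ p.1 ≤ n ∧ 1 ≤ p.2 ∧ p.2 ≤ n) :
    ∀ u : Int, 0 ≤ u → u ≤ n →
      ((pvSuccB n rel).getD u.toNat #[]).toList = succL rel u := by
  intro u h0 hun
  unfold pvSuccB
  rw [adjFold_get rel _
    (fun p hp => ⟨(hrel p hp).1, by have := hrel p hp; rw [Array.size_replicate]; omega⟩)
    u.toNat (by rw [Array.size_replicate]; omega)]
  have hbase : (Array.replicate (n+1).toNat (#[] : Array Int)).getD u.toNat #[] = #[] := by
    rw [Array.getD_eq_getD_getElem?, Array.getElem?_replicate]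
    split <;> rfl
  rw [hbase, show ((u.toNat : Nat) : Int) = u by omega]
  rfl
-- ---- B-side bridging ----
lemma stepB_eq (n : Int) (rel : List (Int × Int))
    (hrel : ∀ p ∈ rel, 1 ≤ p.1 ∧ p.1 ≤ n ∧ 1 ≤ p.2 ∧ p.2 ≤ n) (k : Nat) :
    pvStepB n (pvSuccB n rel) (((PySem.List.pyRange 0 (n+1)).map (LPv rel k)).toArray)
      = ((PySem.List.pyRange 0 (n+1)).map (LPv rel (k+1))).toArray := by
  unfold pvStepB
  apply congrArg List.toArray
  apply List.map_congr_left
  intro u hu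
  obtain ⟨hu0, hun⟩ := PySem.List.mem_pyRange_one.mp hu
  rw [adjB_get n rel hrel u hu0 (by omega)]
  have hmap : (succL rel u).map
        (fun v => (((PySem.List.pyRange 0 (n+1)).map (LPv rel k)).toArray).getD v.toNat 0)
      = (succL rel u).map (LPv rel k) := by
    apply List.map_congr_left
    intro v hv
    have hvrel := hrel _ (mem_succL.mp hv)
    have h1 : (((PySem.List.pyRange 0 (n+1)).map (LPv rel k)).toArray).getD v.toNat 0
        = PySem.List.pyGetD ((PySem.List.pyRange 0 (n+1)).map (LPv rel k)) ((v.toNat : Nat) : Int) 0 := by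
      rw [PySem.List.pyGetD_natCast, Array.getD_eq_getD_getElem?, List.getElem?_toArray,
        List.getD_eq_getElem?_getD]
    rw [h1, show ((v.toNat : Nat) : Int) = v by omega,
      PySem.List.pyGetD_map_pyRange_of_nonneg (LPv rel k) (n+1) v 0 (by omega) (by omega)]
  rw [hmap, ← LPv_succ]
lemma dist0_eq (n : Int) (rel : List (Int × Int)) :
    List.replicate (n+1).toNat (1 : Int) = (PySem.List.pyRange 0 (n+1)).map (LPv rel 0) := by
  have : (PySem.List.pyRange 0 (n+1)).map (LPv rel 0)
      = (PySem.List.pyRange 0 (n+1)).map (fun _ => (1:Int)) := rfl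
  rw [this, List.map_const', PySem.List.length_pyRange_one]
  norm_num
lemma LPv_fix (n : Int) {rel : List (Int × Int)}
    (hrel : ∀ p ∈ rel, 1 ≤ p.1 ∧ p.1 ≤ n ∧ 1 ≤ p.2 ∧ p.2 ≤ n) {k : Nat}
    (hfix : ∀ u, 0 ≤ u → u ≤ n → LPv rel (k+1) u = LPv rel k u) :
    ∀ m u, 0 ≤ u → u ≤ n → LPv rel (k+m) u = LPv rel k u := by
  intro m
  induction m with
  | zero => intro u _ _; rfl
  | succ m ih =>
    intro u hu0 hun
    have : (succL rel u).map (LPv rel (k+m)) = (succL rel u).map (LPv rel k) := by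
      apply List.map_congr_left
      intro v hv
      have hvrel := hrel _ (mem_succL.mp hv)
      exact ih v (by omega) (by omega)
    calc LPv rel (k+(m+1)) u = LPv rel ((k+m)+1) u := by ring_nf
      _ = 1 + PySem.List.maxD ((succL rel u).map (LPv rel (k+m))) (fun x => x) 0 := LPv_succ rel (k+m) u
      _ = 1 + PySem.List.maxD ((succL rel u).map (LPv rel k)) (fun x => x) 0 := by rw [this]
      _ = LPv rel (k+1) u := (LPv_succ rel k u).symm
      _ = LPv rel k u := hfix u hu0 hun
lemma roundsB_cyclic (n : Int) (rel : List (Int × Int))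
    (hrel : ∀ p ∈ rel, 1 ≤ p.1 ∧ p.1 ≤ n ∧ 1 ≤ p.2 ∧ p.2 ≤ n)
    (ustar : Int) (h1 : 1 ≤ ustar) (h2 : ustar ≤ n) (hun : ¬ SafeR rel ustar) :
    ∀ (m k : Nat),
      pvRoundsB n (pvSuccB n rel) m (((PySem.List.pyRange 0 (n+1)).map (LPv rel k)).toArray) = -1 := by
  intro m
  induction m with
  | zero => intro k; rfl
  | succ m ih =>
    intro k
    rw [pvRoundsB, stepB_eq n rel hrel k]
    have hne : ((PySem.List.pyRange 0 (n+1)).map (LPv rel (k+1))).toArray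
        ≠ ((PySem.List.pyRange 0 (n+1)).map (LPv rel k)).toArray := by
      intro heqA
      have heq := List.toArray_inj heqA
      have h1' := PySem.List.pyGetD_map_pyRange_of_nonneg (LPv rel (k+1)) (n+1) ustar 0 (by omega) (by omega)
      have h2' := PySem.List.pyGetD_map_pyRange_of_nonneg (LPv rel k) (n+1) ustar 0 (by omega) (by omega)
      have hval : LPv rel (k+1) ustar = LPv rel k ustar := by rw [← h1', ← h2', heq]
      have e1 := LPv_cyclic (u := ustar) (rel := rel) k hun
      have e2 := LPv_cyclic (u := ustar) (rel := rel) (k+1) hun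
      push_cast at e1 e2
      omega
    rw [if_neg hne]
    exact ih (k+1)

lemma roundsB_safe (n : Int) (rel : List (Int × Int))
    (hrel : ∀ p ∈ rel, 1 ≤ p.1 ∧ p.1 ≤ n ∧ 1 ≤ p.2 ∧ p.2 ≤ n) (hn : 1 ≤ n)
    (hsafe : ∀ u, 1 ≤ u → u ≤ n → SafeR rel u) :
    ∀ (m k : Nat), m + k = (min n ((rel.length : Int) + 1)).toNat → 1 ≤ m →
      pvRoundsB n (pvSuccB n rel) m (((PySem.List.pyRange 0 (n+1)).map (LPv rel k)).toArray)
        = (PySem.List.max? ((PySem.List.pyRange 1 (n+1)).map (LPv rel n.toNat)) (fun x => x)).getD 0 := by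
  have hstab := LPv_stab n hrel hn hsafe
  intro m
  induction m with
  | zero => intro k _ h1m; omega
  | succ m ih =>
    intro k hmk _
    rw [pvRoundsB, stepB_eq n rel hrel k]
    by_cases heqA : ((PySem.List.pyRange 0 (n+1)).map (LPv rel (k+1))).toArray
        = ((PySem.List.pyRange 0 (n+1)).map (LPv rel k)).toArray
    · rw [if_pos heqA]
      have heq := List.toArray_inj heqA
      have hfix : ∀ u, 0 ≤ u → u ≤ n → LPv rel (k+1) u = LPv rel k u := by
        intro u hu0 hun
        have h1' := PySem.List.pyGetD_map_pyRange_of_nonneg (LPv rel (k+1)) (n+1) u 0 (by omega) (by omega)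
        have h2' := PySem.List.pyGetD_map_pyRange_of_nonneg (LPv rel k) (n+1) u 0 (by omega) (by omega)
        rw [← h1', ← h2', heq]
      have hcons : PySem.List.pyRange 0 (n+1) = 0 :: PySem.List.pyRange 1 (n+1) := by
        rw [PySem.List.pyRange_one_cons (by omega)]
        norm_num
      have hmap2 : (PySem.List.pyRange 1 (n+1)).map (LPv rel k)
          = (PySem.List.pyRange 1 (n+1)).map (LPv rel n.toNat) := by
        apply List.map_congr_left
        intro u hu
        obtain ⟨hu1, hun⟩ := PySem.List.mem_pyRange_one.mp hu
        have hkn : k ≤ n.toNat := by omega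
        have := LPv_fix n hrel hfix (n.toNat - k) u (by omega) (by omega)
        rw [show k + (n.toNat - k) = n.toNat by omega] at this
        exact this.symm
      rw [List.toList_toArray, hcons, List.map_cons, PySem.List.slice_from_one,
        List.tail_cons, hmap2]
    · rw [if_neg heqA]
      cases m with
      | zero =>
        exfalso
        refine heqA (congrArg List.toArray (List.map_congr_left ?_))
        intro u hu
        obtain ⟨hu0, hun⟩ := PySem.List.mem_pyRange_one.mp hu
        exact hstab k (by omega) u (by omega) (by omega)
      | succ m' => exact ih (k+1) (by omega) (by omega)
lemma reachP_tail {rel : List (Int × Int)} {w u v : Int} (h : ReachP rel w u)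
    (e : (u, v) ∈ rel) : ReachP rel w v := by
  obtain ⟨b, e', hr⟩ := h
  exact ⟨b, e', ReachR.tail hr e⟩
-- ---- memo-array lookups (pvDGet / pvDSet) ----
lemma dget_set_self {α : Type} (d : Array (Option α)) (u : Int) (x : α)
    (hu : u.toNat < d.size) : pvDGet (pvDSet d u x) u = some x := by
  unfold pvDGet pvDSet
  rw [Array.getD_eq_getD_getElem?, Array.getElem?_setIfInBounds, if_pos rfl, if_pos hu]
  rfl

lemma dget_set_ne {α : Type} (d : Array (Option α)) (u w : Int) (x : α)
    (hu : 1 ≤ u) (hne : w ≠ u) : pvDGet (pvDSet d u x) w = pvDGet d w := by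
  unfold pvDGet pvDSet
  rw [Array.getD_eq_getD_getElem?, Array.getElem?_setIfInBounds,
    if_neg (by omega), ← Array.getD_eq_getD_getElem?]

lemma dset_size {α : Type} (d : Array (Option α)) (u : Int) (x : α) :
    (pvDSet d u x).size = d.size := Array.size_setIfInBounds

lemma dget_replicate {α : Type} (k : Nat) (w : Int) :
    pvDGet (Array.replicate k (none : Option α)) w = none := by
  unfold pvDGet
  rw [Array.getD_eq_getD_getElem?, Array.getElem?_replicate]
  split <;> rfl

def InvT (n : Int) (rel : List (Int × Int)) (d : Array (Option Bool)) : Prop :=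
  d.size = (n+1).toNat ∧
  ∀ w b, pvDGet d w = some b → (1 ≤ w ∧ w ≤ n) ∧ (b = true → SafeR rel w)
noncomputable def Ucnt (n : Int) (d : Array (Option Bool)) : Nat :=
  ((Finset.Icc (1:Int) n).filter (fun w => pvDGet d w = none)).card
def InvB (n : Int) (Lf : Int → Int) (d : Array (Option Int)) : Prop :=
  d.size = (n+1).toNat ∧
  ∀ w x, pvDGet d w = some x → (1 ≤ w ∧ w ≤ n) ∧ x = Lf w

lemma Ucnt_insert (n : Int) (d : Array (Option Bool)) (u : Int) (b : Bool)
    (hu : pvDGet d u = none) (h1 : 1 ≤ u) (h2 : u ≤ n) (hsz : u.toNat < d.size) :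
    Ucnt n (pvDSet d u b) + 1 = Ucnt n d := by
  unfold Ucnt
  have hset : (Finset.Icc (1:Int) n).filter (fun w => pvDGet (pvDSet d u b) w = none)
      = ((Finset.Icc (1:Int) n).filter (fun w => pvDGet d w = none)).erase u := by
    ext w
    simp only [Finset.mem_erase, Finset.mem_filter, Finset.mem_Icc]
    constructor
    · rintro ⟨hicc, hnone⟩
      by_cases hw : w = u
      · rw [hw, dget_set_self d u b hsz] at hnone
        exact absurd hnone (by simp)
      · rw [dget_set_ne d u w b h1 hw] at hnone
        exact ⟨hw, hicc, hnone⟩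
    · rintro ⟨hw, hicc, hnone⟩
      rw [dget_set_ne d u w b h1 hw]
      exact ⟨hicc, hnone⟩
  rw [hset, Finset.card_erase_of_mem (by simp [Finset.mem_filter, Finset.mem_Icc, hu, h1, h2])]
  have hpos : 0 < ((Finset.Icc (1:Int) n).filter (fun w => pvDGet d w = none)).card :=
    Finset.card_pos.mpr ⟨u, by simp [Finset.mem_filter, Finset.mem_Icc, hu, h1, h2]⟩
  omega

lemma Ucnt_mono (n : Int) (d d' : Array (Option Bool))
    (h : ∀ w, pvDGet d' w = none → pvDGet d w = none) : Ucnt n d' ≤ Ucnt n d := by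
  unfold Ucnt
  apply Finset.card_le_card
  intro w hw
  simp only [Finset.mem_filter] at *
  exact ⟨hw.1, h w hw.2⟩

def IsDagGood (n : Int) (rel : List (Int × Int)) (g : Array (Array Int)) (fuel : Nat) : Prop :=
  ∀ (u : Int) (d : Array (Option Bool)), 1 ≤ u → u ≤ n → InvT n rel d →
    (∀ w, pvDGet d w = some false → ReachP rel w u) → Ucnt n d < fuel →
    ((pvIsDagA g fuel u d).1 = true →
       SafeR rel u ∧ InvT n rel (pvIsDagA g fuel u d).2
       ∧ (∀ w, pvDGet (pvIsDagA g fuel u d).2 w = some false → pvDGet d w = some false)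
       ∧ (∀ w, pvDGet (pvIsDagA g fuel u d).2 w = none → pvDGet d w = none))
    ∧ ((pvIsDagA g fuel u d).1 = false → ∃ z, 1 ≤ z ∧ z ≤ n ∧ ¬ SafeR rel z)

lemma isDagAll_good (n : Int) (rel : List (Int × Int)) (g : Array (Array Int))
    (fuel : Nat) (hP : IsDagGood n rel g fuel) :
    ∀ (vs : List Int) (d : Array (Option Bool)), (∀ v ∈ vs, 1 ≤ v ∧ v ≤ n) → InvT n rel d →
    (∀ v ∈ vs, ∀ w, pvDGet d w = some false → ReachP rel w v) → Ucnt n d < fuel →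
    ((pvIsDagAAll g fuel vs d).1 = true →
       (∀ v ∈ vs, SafeR rel v) ∧ InvT n rel (pvIsDagAAll g fuel vs d).2
       ∧ (∀ w, pvDGet (pvIsDagAAll g fuel vs d).2 w = some false → pvDGet d w = some false)
       ∧ (∀ w, pvDGet (pvIsDagAAll g fuel vs d).2 w = none → pvDGet d w = none))
    ∧ ((pvIsDagAAll g fuel vs d).1 = false → ∃ z, 1 ≤ z ∧ z ≤ n ∧ ¬ SafeR rel z) := by
  intro vs
  induction vs with
  | nil =>
    intro d _ hInv _ _
    have h0 : pvIsDagAAll g fuel [] d = (true, d) := by simp [pvIsDagAAll]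
    rw [h0]
    exact ⟨fun _ => ⟨by simp, hInv, fun w hw => hw, fun w hw => hw⟩, by simp⟩
  | cons v vs ih =>
    intro d hvs hInv hStack hU
    have hv := hvs v List.mem_cons_self
    have hPd := hP v d hv.1 hv.2 hInv (hStack v List.mem_cons_self) hU
    have hunfold : pvIsDagAAll g fuel (v::vs) d
        = if (pvIsDagA g fuel v d).1 then pvIsDagAAll g fuel vs (pvIsDagA g fuel v d).2
          else (false, (pvIsDagA g fuel v d).2) := by
      simp [pvIsDagAAll]
    cases hb : (pvIsDagA g fuel v d).1 with
    | false =>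
      rw [hunfold, if_neg (by simp [hb])]
      exact ⟨by simp, fun _ => hPd.2 hb⟩
    | true =>
      obtain ⟨hSafe, hInv', hFmono, hNmono⟩ := hPd.1 hb
      rw [hunfold, if_pos (by simp [hb])]
      have hU' : Ucnt n (pvIsDagA g fuel v d).2 < fuel :=
        lt_of_le_of_lt (Ucnt_mono n d _ hNmono) hU
      have hStack' : ∀ v' ∈ vs, ∀ w, pvDGet (pvIsDagA g fuel v d).2 w = some false → ReachP rel w v' :=
        fun v' hv' w hw => hStack v' (List.mem_cons_of_mem _ hv') w (hFmono w hw)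
      have hIH := ih (pvIsDagA g fuel v d).2 (fun v' hv' => hvs v' (List.mem_cons_of_mem _ hv'))
        hInv' hStack' hU'
      refine ⟨fun htrue => ?_, hIH.2⟩
      obtain ⟨hSafeAll, hInv'', hFmono', hNmono'⟩ := hIH.1 htrue
      refine ⟨?_, hInv'', fun w hw => hFmono w (hFmono' w hw), fun w hw => hNmono w (hNmono' w hw)⟩
      intro v' hv'
      rcases List.mem_cons.mp hv' with rfl | hmem
      · exact hSafe
      · exact hSafeAll v' hmem

lemma isDagA_good (n : Int) (rel : List (Int × Int)) (g : Array (Array Int))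
    (hrel : ∀ p ∈ rel, 1 ≤ p.1 ∧ p.1 ≤ n ∧ 1 ≤ p.2 ∧ p.2 ≤ n)
    (hg : ∀ u, 1 ≤ u → u ≤ n → (g.getD u.toNat #[]).toList = succL rel u) :
    ∀ fuel, IsDagGood n rel g fuel := by
  intro fuel
  induction fuel with
  | zero => intro u d _ _ _ _ hU; omega
  | succ fuel ih =>
    intro u d h1 h2 hInv hStack hU
    have hszu : u.toNat < d.size := by rw [hInv.1]; omega
    cases hget : pvDGet d u with
    | some b =>
      have hunfold : pvIsDagA g (fuel+1) u d = (b, d) := by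
        simp [pvIsDagA, hget]
      rw [hunfold]
      cases b with
      | true =>
        refine ⟨fun _ => ⟨(hInv.2 u true hget).2 rfl, hInv, fun w hw => hw, fun w hw => hw⟩,
          by simp⟩
      | false =>
        refine ⟨by simp, fun _ => ⟨u, h1, h2, cyc_not_safe (hStack u hget)⟩⟩
    | none =>
      have hgl : (g[u.toNat]?.getD #[]).toList = succL rel u := by
        rw [← Array.getD_eq_getD_getElem?]
        exact hg u h1 h2
      have hunfold : pvIsDagA g (fuel+1) u d
          = if (pvIsDagAAll g fuel (succL rel u) (pvDSet d u false)).1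
            then (true, pvDSet (pvIsDagAAll g fuel (succL rel u) (pvDSet d u false)).2 u true)
            else (false, (pvIsDagAAll g fuel (succL rel u) (pvDSet d u false)).2) := by
        simp [pvIsDagA, hget, hgl]
      have hInv2 : InvT n rel (pvDSet d u false) := by
        refine ⟨by rw [dset_size]; exact hInv.1, ?_⟩
        intro w b hw
        by_cases hwu : w = u
        · rw [hwu] at hw ⊢
          rw [dget_set_self d u false hszu] at hw
          refine ⟨⟨h1, h2⟩, ?_⟩
          rintro rfl
          simp at hw
        · rw [dget_set_ne d u w false h1 hwu] at hw
          exact hInv.2 w b hw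
      have hvs : ∀ v ∈ succL rel u, 1 ≤ v ∧ v ≤ n := by
        intro v hv
        have := hrel _ (mem_succL.mp hv)
        exact ⟨this.2.2.1, this.2.2.2⟩
      have hStack2 : ∀ v ∈ succL rel u, ∀ w, pvDGet (pvDSet d u false) w = some false →
          ReachP rel w v := by
        intro v hv w hw
        by_cases hwu : w = u
        · rw [hwu]
          exact ⟨v, mem_succL.mp hv, ReachR.refl v⟩
        · rw [dget_set_ne d u w false h1 hwu] at hw
          exact reachP_tail (hStack w hw) (mem_succL.mp hv)
      have hU2 : Ucnt n (pvDSet d u false) < fuel := by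
        have := Ucnt_insert n d u false hget h1 h2 hszu
        omega
      have hQ := isDagAll_good n rel g fuel ih (succL rel u) (pvDSet d u false) hvs hInv2 hStack2 hU2
      cases hb : (pvIsDagAAll g fuel (succL rel u) (pvDSet d u false)).1 with
      | false =>
        rw [hunfold, if_neg (by simp [hb])]
        exact ⟨by simp, fun _ => hQ.2 hb⟩
      | true =>
        obtain ⟨hSafeAll, hInv', hFmono, hNmono⟩ := hQ.1 hb
        rw [hunfold, if_pos (by simp [hb])]
        have hSafeU : SafeR rel u :=
          Acc.intro u (fun v hv => hSafeAll v (mem_succL.mpr hv))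
        have hszu' : u.toNat < (pvIsDagAAll g fuel (succL rel u) (pvDSet d u false)).2.size := by
          rw [hInv'.1]; omega
        refine ⟨fun _ => ⟨hSafeU, ?_, ?_, ?_⟩, by simp⟩
        · refine ⟨by rw [dset_size]; exact hInv'.1, ?_⟩
          intro w b hw
          by_cases hwu : w = u
          · rw [hwu] at hw ⊢
            rw [dget_set_self _ u true hszu'] at hw
            exact ⟨⟨h1, h2⟩, fun _ => hSafeU⟩
          · rw [dget_set_ne _ u w true h1 hwu] at hw
            exact hInv'.2 w b hw
        · intro w hw
          by_cases hwu : w = u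
          · rw [hwu, dget_set_self _ u true hszu'] at hw
            simp at hw
          · rw [dget_set_ne _ u w true h1 hwu] at hw
            have := hFmono w hw
            rw [dget_set_ne d u w false h1 hwu] at this
            exact this
        · intro w hw
          by_cases hwu : w = u
          · rw [hwu, dget_set_self _ u true hszu'] at hw
            simp at hw
          · rw [dget_set_ne _ u w true h1 hwu] at hw
            have := hNmono w hw
            rw [dget_set_ne d u w false h1 hwu] at this
            exact this
lemma foldl_max_aux (f : Int → Int) :
    ∀ (t : List Int) (a : Int),
      t.foldl (fun x w => max x (f w + 1)) (a + 1) = 1 + (t.map f).foldl max a := by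
  intro t
  induction t with
  | nil => intro a; simp; omega
  | cons w t ih =>
    intro a
    rw [List.foldl_cons, List.map_cons, List.foldl_cons]
    have h1 : max (a + 1) (f w + 1) = (max a (f w)) + 1 := by omega
    rw [h1, ih (max a (f w))]
lemma foldl_max_one (f : Int → Int) (l : List Int) (hf : ∀ v ∈ l, 1 ≤ f v) :
    l.foldl (fun x v => max x (f v + 1)) 1 = 1 + PySem.List.maxD (l.map f) (fun x => x) 0 := by
  cases l with
  | nil => rfl
  | cons v t =>
    have h1 : (1:Int) = 0 + 1 := by omega
    rw [List.foldl_cons]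
    have h2 : max 1 (f v + 1) = f v + 1 := by
      have := hf v List.mem_cons_self; omega
    rw [h2, foldl_max_aux f t (f v), List.map_cons]
    unfold PySem.List.maxD
    rw [PySem.List.max?_id_cons]
    rfl
lemma btA_good (n : Int) (rel : List (Int × Int)) (g : Array (Array Int))
    (hrel : ∀ p ∈ rel, 1 ≤ p.1 ∧ p.1 ≤ n ∧ 1 ≤ p.2 ∧ p.2 ≤ n)
    (hg : ∀ u, 1 ≤ u → u ≤ n → (g.getD u.toNat #[]).toList = succL rel u)
    (Lf : Int → Int)
    (hLpos : ∀ u, 1 ≤ Lf u)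
    (hLfix : ∀ u, 1 ≤ u → u ≤ n →
      Lf u = 1 + PySem.List.maxD ((succL rel u).map Lf) (fun x => x) 0) :
    ∀ (fuel : Nat) (u : Int) (d : Array (Option Int)), 1 ≤ u → u ≤ n → InvB n Lf d →
      Lf u ≤ (fuel : Int) →
      (pvBtA g fuel u d).1 = Lf u ∧ InvB n Lf (pvBtA g fuel u d).2 := by
  intro fuel
  induction fuel with
  | zero =>
    intro u d _ _ _ hfu
    have := hLpos u
    norm_num at hfu
    omega
  | succ fuel ih =>
    have hFor : ∀ (vs : List Int) (acc : Int) (d : Array (Option Int)),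
        (∀ v ∈ vs, 1 ≤ v ∧ v ≤ n ∧ Lf v ≤ (fuel : Int)) → InvB n Lf d →
        (pvBtAFor g fuel vs acc d).1 = vs.foldl (fun a v => max a (Lf v + 1)) acc
          ∧ InvB n Lf (pvBtAFor g fuel vs acc d).2 := by
      intro vs
      induction vs with
      | nil => intro acc d _ hInv; exact ⟨by simp [pvBtAFor], by simpa [pvBtAFor] using hInv⟩
      | cons v vs ihv =>
        intro acc d hvs hInv
        have hv := hvs v List.mem_cons_self
        have hPd := ih v d hv.1 hv.2.1 hInv hv.2.2
        have hunfold : pvBtAFor g fuel (v::vs) acc d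
            = pvBtAFor g fuel vs (max acc ((pvBtA g fuel v d).1 + 1)) (pvBtA g fuel v d).2 := by
          simp [pvBtAFor]
        rw [hunfold, hPd.1]
        have := ihv (max acc (Lf v + 1)) (pvBtA g fuel v d).2
          (fun v' hv' => hvs v' (List.mem_cons_of_mem _ hv')) hPd.2
        rw [List.foldl_cons]
        exact this
    intro u d h1 h2 hInv hfu
    have hszu : u.toNat < d.size := by rw [hInv.1]; omega
    cases hget : pvDGet d u with
    | some m =>
      have hunfold : pvBtA g (fuel+1) u d = (m, d) := by simp [pvBtA, hget]
      rw [hunfold]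
      exact ⟨(hInv.2 u m hget).2, hInv⟩
    | none =>
      have hgl : (g[u.toNat]?.getD #[]).toList = succL rel u := by
        rw [← Array.getD_eq_getD_getElem?]
        exact hg u h1 h2
      have hunfold : pvBtA g (fuel+1) u d
          = ((pvBtAFor g fuel (succL rel u) 1 d).1,
             pvDSet (pvBtAFor g fuel (succL rel u) 1 d).2 u (pvBtAFor g fuel (succL rel u) 1 d).1) := by
        simp [pvBtA, hget, hgl]
      have hvs : ∀ v ∈ succL rel u, 1 ≤ v ∧ v ≤ n ∧ Lf v ≤ (fuel : Int) := by
        intro v hv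
        have hb := hrel _ (mem_succL.mp hv)
        refine ⟨hb.2.2.1, hb.2.2.2, ?_⟩
        have hmem : Lf v ∈ (succL rel u).map Lf := List.mem_map_of_mem hv
        have hle := le_maxD_of_mem hmem 0
        have := hLfix u h1 h2
        push_cast at hfu ⊢
        omega
      have hF := hFor (succL rel u) 1 d hvs hInv
      have hval : (pvBtAFor g fuel (succL rel u) 1 d).1 = Lf u := by
        rw [hF.1, foldl_max_one Lf (succL rel u) (fun v _ => hLpos v), ← hLfix u h1 h2]
      rw [hunfold]
      refine ⟨hval, ?_⟩
      refine ⟨by rw [dset_size]; exact hF.2.1, ?_⟩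
      intro w x hw
      by_cases hwu : w = u
      · rw [hwu, dget_set_self _ u _ (by rw [hF.2.1]; omega)] at hw
        have hx : x = (pvBtAFor g fuel (succL rel u) 1 d).1 := by
          injection hw with h
          omega
        rw [hwu]
        exact ⟨⟨h1, h2⟩, by rw [hx, hval]⟩
      · rw [dget_set_ne _ u w _ h1 hwu] at hw
        exact hF.2.2 w x hw

lemma maxBt_good (n : Int) (g : Array (Array Int))
    (fuel : Nat) (Lf : Int → Int)
    (hbt : ∀ (u : Int) (d : Array (Option Int)), 1 ≤ u → u ≤ n → InvB n Lf d →
      (pvBtA g fuel u d).1 = Lf u ∧ InvB n Lf (pvBtA g fuel u d).2) :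
    ∀ (us : List Int) (m : Int) (d : Array (Option Int)),
      (∀ u ∈ us, 1 ≤ u ∧ u ≤ n) → InvB n Lf d →
      pvMaxBtA g fuel us (some m) d = (us.map Lf).foldl max m := by
  intro us
  induction us with
  | nil => intro m d _ _; rfl
  | cons u us ih =>
    intro m d hus hInv
    have hu := hus u List.mem_cons_self
    have hPd := hbt u d hu.1 hu.2 hInv
    have hunfold : pvMaxBtA g fuel (u::us) (some m) d
        = pvMaxBtA g fuel us (some (max m (pvBtA g fuel u d).1)) (pvBtA g fuel u d).2 := rfl
    rw [hunfold, hPd.1, List.map_cons, List.foldl_cons]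
    exact ih (max m (Lf u)) _ (fun v hv => hus v (List.mem_cons_of_mem _ hv)) hPd.2
-- ===== final assembly =====
lemma main_eq (n : Int) (rel : List (Int × Int)) (hn : 1 ≤ n)
    (hrel : ∀ p ∈ rel, 1 ≤ p.1 ∧ p.1 ≤ n ∧ 1 ≤ p.2 ∧ p.2 ≤ n) :
    sol_dfs n rel = sol_dfs_alt n rel := by
  have hg : ∀ u, 1 ≤ u → u ≤ n → ((pvGraphA n rel).getD u.toNat #[]).toList = succL rel u :=
    fun u h1 h2 => adjA_get n rel hrel u (by omega) h2
  have hInvE : InvT n rel (Array.replicate (n+1).toNat none) := by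
    refine ⟨Array.size_replicate, ?_⟩
    intro w b hw
    rw [dget_replicate] at hw
    cases hw
  have hUempty : Ucnt n (Array.replicate (n+1).toNat none) = n.toNat := by
    unfold Ucnt
    have : (Finset.Icc (1:Int) n).filter
        (fun w => pvDGet (Array.replicate (n+1).toNat (none : Option Bool)) w = none)
        = Finset.Icc (1:Int) n := by
      apply Finset.filter_true_of_mem
      intro w _
      exact dget_replicate (n+1).toNat w
    rw [this, Int.card_Icc]
    omega
  have hQ := isDagAll_good n rel (pvGraphA n rel) (n.toNat+1)
    (isDagA_good n rel (pvGraphA n rel) hrel hg (n.toNat+1)) (PySem.List.pyRange 1 (n+1))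
    (Array.replicate (n+1).toNat none)
    (by
      intro v hv
      obtain ⟨ha, hb⟩ := PySem.List.mem_pyRange_one.mp hv
      exact ⟨ha, by omega⟩)
    hInvE
    (by
      intro v _ w hw
      rw [dget_replicate] at hw
      cases hw)
    (by omega)
  have hA : sol_dfs n rel
      = if (pvIsDagAAll (pvGraphA n rel) (n.toNat+1) (PySem.List.pyRange 1 (n+1))
              (Array.replicate (n+1).toNat none)).1
        then pvMaxBtA (pvGraphA n rel) (n.toNat+1) (PySem.List.pyRange 1 (n+1)) none
              (Array.replicate (n+1).toNat none)
        else -1 := rfl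
  have hinit : Array.replicate (n+1).toNat (1 : Int)
      = ((PySem.List.pyRange 0 (n+1)).map (LPv rel 0)).toArray := by
    rw [Array.replicate_eq_toArray_replicate]
    exact congrArg List.toArray (dist0_eq n rel)
  have hB : sol_dfs_alt n rel
      = pvRoundsB n (pvSuccB n rel) (min n ((rel.length : Int) + 1)).toNat
          (((PySem.List.pyRange 0 (n+1)).map (LPv rel 0)).toArray) := by
    rw [show sol_dfs_alt n rel
        = pvRoundsB n (pvSuccB n rel) (min n ((rel.length : Int) + 1)).toNat
            (Array.replicate (n+1).toNat 1) from rfl, hinit]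
  by_cases hall : ∀ u, 1 ≤ u → u ≤ n → SafeR rel u
  · -- acyclic case
    cases hchk : (pvIsDagAAll (pvGraphA n rel) (n.toNat+1) (PySem.List.pyRange 1 (n+1))
        (Array.replicate (n+1).toNat none)).1 with
    | false =>
      exfalso
      obtain ⟨z, hz1, hz2, hzun⟩ := hQ.2 hchk
      exact hzun (hall z hz1 hz2)
    | true =>
      rw [hA, hchk, if_pos rfl, hB]
      have hLpos : ∀ u, 1 ≤ LPv rel n.toNat u := fun u => LPv_pos rel n.toNat u
      have hLfix : ∀ u, 1 ≤ u → u ≤ n →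
          LPv rel n.toNat u = 1 + PySem.List.maxD ((succL rel u).map (LPv rel n.toNat)) (fun x => x) 0 := by
        intro u h1 h2
        have hs := LPv_stab n hrel hn hall n.toNat (by omega) u (by omega) h2
        rw [← hs, LPv_succ]
      have hbt : ∀ (u : Int) (d : Array (Option Int)), 1 ≤ u → u ≤ n → InvB n (LPv rel n.toNat) d →
          (pvBtA (pvGraphA n rel) (n.toNat+1) u d).1 = LPv rel n.toNat u
            ∧ InvB n (LPv rel n.toNat) (pvBtA (pvGraphA n rel) (n.toNat+1) u d).2 := by
        intro u d h1 h2 hInv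
        apply btA_good n rel (pvGraphA n rel) hrel hg (LPv rel n.toNat) hLpos hLfix (n.toNat+1) u d h1 h2 hInv
        have := safe_bound n hrel hn u (hall u h1 h2) h1 h2 n.toNat
        push_cast
        omega
      have hcons : PySem.List.pyRange 1 (n+1) = 1 :: PySem.List.pyRange 2 (n+1) := by
        rw [PySem.List.pyRange_one_cons (by omega)]
        norm_num
      have hInvE' : InvB n (LPv rel n.toNat) (Array.replicate (n+1).toNat none) := by
        refine ⟨Array.size_replicate, ?_⟩
        intro w x hw
        rw [dget_replicate] at hw
        cases hw
      have hbt1 := hbt 1 (Array.replicate (n+1).toNat none) (by omega) (by omega) hInvE'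
      have hAval : pvMaxBtA (pvGraphA n rel) (n.toNat+1) (PySem.List.pyRange 1 (n+1)) none
            (Array.replicate (n+1).toNat none)
          = ((PySem.List.pyRange 2 (n+1)).map (LPv rel n.toNat)).foldl max (LPv rel n.toNat 1) := by
        rw [hcons]
        have hstep : pvMaxBtA (pvGraphA n rel) (n.toNat+1) (1 :: PySem.List.pyRange 2 (n+1)) none
              (Array.replicate (n+1).toNat none)
            = pvMaxBtA (pvGraphA n rel) (n.toNat+1) (PySem.List.pyRange 2 (n+1))
                (some (pvBtA (pvGraphA n rel) (n.toNat+1) 1 (Array.replicate (n+1).toNat none)).1)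
                (pvBtA (pvGraphA n rel) (n.toNat+1) 1 (Array.replicate (n+1).toNat none)).2 := rfl
        rw [hstep, hbt1.1]
        exact maxBt_good n (pvGraphA n rel) (n.toNat+1) (LPv rel n.toNat) hbt
          (PySem.List.pyRange 2 (n+1)) (LPv rel n.toNat 1) _
          (by
            intro v hv
            have := PySem.List.mem_pyRange_one.mp hv
            omega)
          hbt1.2
      have hBval := roundsB_safe n rel hrel hn hall (min n ((rel.length : Int) + 1)).toNat 0
        (by omega) (by omega)
      rw [hAval, hBval, hcons, List.map_cons, PySem.List.max?_id_cons]
      rfl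
  · -- cyclic case
    push_neg at hall
    obtain ⟨z, hz1, hz2, hzun⟩ := hall
    cases hchk : (pvIsDagAAll (pvGraphA n rel) (n.toNat+1) (PySem.List.pyRange 1 (n+1))
        (Array.replicate (n+1).toNat none)).1 with
    | true =>
      exfalso
      have hSafeAll := (hQ.1 hchk).1
      refine hzun (hSafeAll z ?_)
      exact PySem.List.mem_pyRange_one.mpr ⟨hz1, by omega⟩
    | false =>
      rw [hA, hchk, if_neg (by simp), hB]
      exact (roundsB_cyclic n rel hrel z hz1 hz2 hzun (min n ((rel.length : Int) + 1)).toNat 0).symm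

-- ===== VERDICT (by name: the statement is the Claim_ definition above) =====
theorem sol_dfs_spec : Claim_equal_sol_dfs := by
  intro n relations _ hpre
  obtain ⟨hn, hrel⟩ := hpre
  show sol_dfs n relations = sol_dfs_alt n relations
  exact main_eq n relations hn hrel
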